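-- pv_equiv track=rewrite | github.com/squishyjs/daily-solve | Python/sellingdonuts.py | selling_donuts_solution
-- ===== SOURCE A (Python) =====
-- def selling_donuts_solution(donuts: list[int], customers: list[int]) -> int:
--     sad_customers: int = 0
--
--     for customer in customers:
--         donut_type = customer - 1 # 0-based index
--         if donuts[donut_type] > 0:
--             donuts[donut_type] -= 1
--             continue
--         sad_customers += 1  # customer is sad otherwise
--
--     return sad_customers
-- ===== SOURCE B (Python) =====
-- def selling_donuts_solution(donuts: list[int], customers: list[int]) -> int:
--     demand: dict[int, int] = {}
--     for c in customers:
--         demand[c] = demand.get(c, 0) + 1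
--
--     sad = 0
--     for c, cnt in demand.items():
--         available = donuts[c - 1]
--         if available > 0:
--             served = min(cnt, available)
--             donuts[c - 1] = available - served
--             sad += cnt - served
--         else:
--             sad += cnt
--     return sad
-- ===== Notes on version B (the rewrite author's own statement) =====
-- stated objective: alternative
-- what changed: Replaces A's per-customer serve simulation (one stock decrement per customer) with a two-phase pass: tally demand per donut type into a dict, then settle each distinct type once with min-arithmetic; Pre_ excludes only inputs where A raises IndexError (a customer index out of range of donuts).
import Mathlib
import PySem

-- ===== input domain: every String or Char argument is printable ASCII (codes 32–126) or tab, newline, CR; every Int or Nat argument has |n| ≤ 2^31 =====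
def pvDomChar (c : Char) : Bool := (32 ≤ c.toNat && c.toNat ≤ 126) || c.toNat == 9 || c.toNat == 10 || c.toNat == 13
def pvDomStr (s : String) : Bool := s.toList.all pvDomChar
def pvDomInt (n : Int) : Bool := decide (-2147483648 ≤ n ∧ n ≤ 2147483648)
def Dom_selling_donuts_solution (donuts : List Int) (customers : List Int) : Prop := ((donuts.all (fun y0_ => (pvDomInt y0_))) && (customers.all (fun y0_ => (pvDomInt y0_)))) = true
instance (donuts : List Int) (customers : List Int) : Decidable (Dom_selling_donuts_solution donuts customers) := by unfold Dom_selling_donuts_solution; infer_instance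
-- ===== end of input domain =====

-- B replaces A's per-customer serve loop with a tally-then-settle pass over distinct types
-- (alternative decomposition, same cost class); both Pythons mutate `donuts` the same way in
-- range, but the equivalence proved here is about the RETURN value only.

-- ===== PORT A =====
-- A's for-loop over customers, carrying the (mutated) donuts list and the sad counter.
def sdServe (donuts : List Int) (sad : Int) : List Int → Int
  | [] => sad
  | c :: rest =>
    match PySem.List.pyGet? donuts (c - 1) with
    | none => sad  -- Python raises IndexError here; excluded by Pre_
    | some v =>
      if v > 0 then sdServe (PySem.List.pySetD donuts (c - 1) (v - 1)) sad rest
      else sdServe donuts (sad + 1) rest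

def selling_donuts_solution (donuts : List Int) (customers : List Int) : Int :=
  sdServe donuts 0 customers

-- ===== PORT B =====
-- `demand[c] = demand.get(c, 0) + 1` over all customers
def sdCount (customers : List Int) : PySem.Dict Int Int :=
  customers.foldl (fun d c => d.insert c (d.getD c 0 + 1)) PySem.Dict.empty

-- the body of B's settle loop over `demand.items()`, carrying (donuts, sad)
def sdStep : (List Int × Int) → (Int × Int) → (List Int × Int) := fun (donuts, sad) p =>
  match PySem.List.pyGet? donuts (p.1 - 1) with
  | none => (donuts, sad)  -- Python raises IndexError here; excluded by Pre_
  | some available =>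
    if available > 0 then
      let served := min p.2 available
      (PySem.List.pySetD donuts (p.1 - 1) (available - served), sad + (p.2 - served))
    else (donuts, sad + p.2)

def selling_donuts_solution_alt (donuts : List Int) (customers : List Int) : Int :=
  (((sdCount customers).items).foldl sdStep (donuts, 0)).2

-- ===== PRECONDITION & SPEC =====
-- Pre_ excludes exactly the inputs on which A raises IndexError: a customer whose 0-based
-- donut type (customer - 1, Python negative indices allowed) is out of range of `donuts`.
def Pre_selling_donuts_solution (donuts : List Int) (customers : List Int) : Prop :=
  ∀ c ∈ customers, PySem.Raise.InRange donuts.length (c - 1)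
instance (donuts : List Int) (customers : List Int) : Decidable (Pre_selling_donuts_solution donuts customers) := by unfold Pre_selling_donuts_solution; infer_instance

def pvWitness_selling_donuts_solution : List Int × List Int := ([2, 1], [1, 2, 2, 0])

def Spec_selling_donuts_solution (donuts : List Int) (customers : List Int) (out : Int) : Prop := out = selling_donuts_solution_alt donuts customers
instance (donuts : List Int) (customers : List Int) (out : Int) : Decidable (Spec_selling_donuts_solution donuts customers out) := by unfold Spec_selling_donuts_solution; infer_instance

-- ===== CLAIM (what is proved, stated in full; the proofs are below) =====
def Claim_equal_selling_donuts_solution : Prop := ∀ (donuts : List Int) (customers : List Int), Dom_selling_donuts_solution donuts customers → Pre_selling_donuts_solution donuts customers → Spec_selling_donuts_solution donuts customers (selling_donuts_solution donuts customers)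

-- ===== LEMMAS AND PROOFS =====

-- the sad count a demand of `need` contributes against a stock of `v`
def gSad (need v : Int) : Int := need - min need (max v 0)

-- total demand a pair list (type, count) places on cell i of a length-n list
def needP (n : Int) (P : List (Int × Int)) (i : Int) : Int :=
  (P.map (fun p => if PySem.Int.mod (p.1 - 1) n = i then p.2 else 0)).sum

-- the common semantic form both ports are reduced to
def sumSadP (donuts : List Int) (P : List (Int × Int)) : Int :=
  ((List.range donuts.length).map
    (fun (k : Nat) => gSad (needP (donuts.length : Int) P ((k : Nat) : Int)) (donuts.getD k 0))).sum

theorem needP_nonneg (n : Int) (P : List (Int × Int)) (i : Int)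
    (hP : ∀ p ∈ P, 0 ≤ p.2) : 0 ≤ needP n P i := by
  apply List.sum_nonneg
  intro x hx
  simp only [List.mem_map] at hx
  obtain ⟨p, hp, rfl⟩ := hx
  split_ifs
  · exact hP p hp
  · exact le_refl 0

theorem needP_cons (n : Int) (q : Int × Int) (P : List (Int × Int)) (i : Int) :
    needP n (q :: P) i = (if PySem.Int.mod (q.1 - 1) n = i then q.2 else 0) + needP n P i := by
  simp [needP]

-- Python's d % n, for an in-range index d over a nonempty list, is the actual position.
theorem mod_inrange {n d : Int} (hn : 0 < n) (h0 : -n ≤ d) (h1 : d < n) :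
    PySem.Int.mod d n = if 0 ≤ d then d else d + n := by
  rw [PySem.Int.mod_eq_emod_of_pos hn]
  split_ifs with h
  · exact Int.emod_eq_of_lt h h1
  · have : (d + n) % n = d % n := Int.add_emod_right d n
    rw [← this]; exact Int.emod_eq_of_lt (by omega) (by omega)

theorem pyGet?_inrange (xs : List Int) {d : Int} (h0 : -(xs.length : Int) ≤ d)
    (h1 : d < (xs.length : Int)) :
    PySem.List.pyGet? xs d = some (xs.getD (PySem.Int.mod d xs.length).toNat 0) := by
  have hn : 0 < (xs.length : Int) := by omega
  rw [mod_inrange hn h0 h1]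
  split_ifs with h
  · rw [PySem.List.pyGet?_eq_some_getElem xs h h1,
      List.getD_eq_getElem xs 0 (by omega)]
  · simp only [PySem.List.pyGet?, PySem.List.pyIdx?, if_neg (by omega : ¬ (0:Int) ≤ d),
      if_pos h0]
    have hidx : xs.length - (-d).toNat = (d + (xs.length : Int)).toNat := by omega
    rw [hidx,
      show (some ((d + (xs.length : Int)).toNat)).bind (fun a => xs[a]?) =
        xs[(d + (xs.length : Int)).toNat]? from rfl,
      List.getElem?_eq_getElem (by omega), List.getD_eq_getElem xs 0 (by omega)]

theorem pySetD_inrange (xs : List Int) {d : Int} (v : Int) (h0 : -(xs.length : Int) ≤ d)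
    (h1 : d < (xs.length : Int)) :
    PySem.List.pySetD xs d v = xs.set (PySem.Int.mod d xs.length).toNat v := by
  have hn : 0 < (xs.length : Int) := by omega
  rw [mod_inrange hn h0 h1]
  split_ifs with h
  · exact PySem.List.pySetD_of_nonneg xs v h
  · simp only [PySem.List.pySetD, PySem.List.pySet?, PySem.List.pyIdx?,
      if_neg (by omega : ¬ (0:Int) ≤ d), if_pos h0, Option.map_some, Option.getD_some]
    congr 1
    omega

theorem sumSadP_nil (donuts : List Int) : sumSadP donuts [] = 0 := by
  apply List.sum_eq_zero
  intro x hx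
  simp only [List.mem_map] at hx
  obtain ⟨k, -, rfl⟩ := hx
  simp [needP, gSad]

-- settling one (type, count) pair folded into the per-cell sum: stock available
theorem sumSadP_cons_pos (donuts : List Int) (c cnt : Int) (P : List (Int × Int))
    (h0 : -(donuts.length : Int) ≤ c - 1) (h1 : c - 1 < (donuts.length : Int))
    (_hcnt : 0 ≤ cnt) (hP : ∀ p ∈ P, 0 ≤ p.2)
    (hv : 0 < donuts.getD (PySem.Int.mod (c - 1) donuts.length).toNat 0) :
    sumSadP donuts ((c, cnt) :: P) =
      (cnt - min cnt (donuts.getD (PySem.Int.mod (c - 1) donuts.length).toNat 0)) +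
      sumSadP (donuts.set (PySem.Int.mod (c - 1) donuts.length).toNat
        (donuts.getD (PySem.Int.mod (c - 1) donuts.length).toNat 0 -
          min cnt (donuts.getD (PySem.Int.mod (c - 1) donuts.length).toNat 0))) P := by
  have hn : 0 < (donuts.length : Int) := by omega
  set i0 : Nat := (PySem.Int.mod (c - 1) donuts.length).toNat with hi0
  have hi0lt : i0 < donuts.length := by
    have := PySem.Int.mod_nonneg (c - 1) hn
    have := PySem.Int.mod_lt (c - 1) hn
    omega
  have hmodi0 : PySem.Int.mod (c - 1) (donuts.length : Int) = (i0 : Int) := by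
    have := PySem.Int.mod_nonneg (c - 1) hn
    omega
  set v : Int := donuts.getD i0 0 with hvdef
  unfold sumSadP
  rw [List.length_set]
  have hsplit :
      (List.range donuts.length).map
        (fun (k : Nat) => gSad (needP (donuts.length : Int) ((c, cnt) :: P) ((k : Nat) : Int))
          (donuts.getD k 0)) =
      (List.range donuts.length).map
        (fun (k : Nat) =>
          (if decide (i0 = k) = true then cnt - min cnt v else 0) +
            gSad (needP (donuts.length : Int) P ((k : Nat) : Int))
              ((donuts.set i0 (v - min cnt v)).getD k 0)) := by
    apply List.map_congr_left
    intro k hk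
    have hklt : k < donuts.length := List.mem_range.mp hk
    rw [needP_cons, hmodi0]
    by_cases hki : i0 = k
    · subst hki
      have hneed := needP_nonneg (donuts.length : Int) P ((i0 : Nat) : Int) hP
      rw [List.getD_eq_getElem _ 0 hklt, List.getD_eq_getElem _ 0 (by simpa using hklt),
        List.getElem_set_self]
      rw [List.getD_eq_getElem _ 0 hklt] at hvdef
      rw [if_pos rfl, if_pos (decide_eq_true rfl)]
      unfold gSad
      omega
    · have hne : ¬ ((i0 : Int) = (k : Int)) := by exact_mod_cast hki
      rw [List.getD_eq_getElem _ 0 hklt, List.getD_eq_getElem _ 0 (by simpa using hklt),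
        List.getElem_set_ne hki, if_neg hne, if_neg (by simpa using hki), zero_add, zero_add]
  rw [hsplit, PySem.List.sum_map_add_int]
  have hcst :
      ((List.range donuts.length).map
        (fun (k : Nat) => if decide (i0 = k) = true then cnt - min cnt v else 0)).sum =
        cnt - min cnt v := by
    have hcount : (List.range donuts.length).countP (fun k => decide (i0 = k)) = 1 := by
      have h1 : (List.range donuts.length).countP (fun k => decide (i0 = k)) =
          (List.range donuts.length).count i0 := by
        apply List.countP_congr
        intro k _
        by_cases h : i0 = k
        · subst h; simp
        · simp [h, Ne.symm h]
      rw [h1, List.count_range, if_pos hi0lt]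
    calc ((List.range donuts.length).map
        (fun (k : Nat) => if decide (i0 = k) = true then cnt - min cnt v else 0)).sum
        = ((List.range donuts.length).map
            (fun (k : Nat) => (cnt - min cnt v) * (if decide (i0 = k) = true then 1 else 0))).sum := by
          apply congrArg; apply List.map_congr_left; intro k _; split_ifs <;> ring
      _ = (cnt - min cnt v) *
            ((List.range donuts.length).map
              (fun (k : Nat) => if decide (i0 = k) = true then (1:Int) else 0)).sum := by
          rw [← List.sum_map_mul_left]
      _ = cnt - min cnt v := by
          rw [PySem.List.sum_map_ite_one_zero, hcount]; ring
  rw [hcst]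

-- settling one (type, count) pair folded into the per-cell sum: no stock
theorem sumSadP_cons_nonpos (donuts : List Int) (c cnt : Int) (P : List (Int × Int))
    (h0 : -(donuts.length : Int) ≤ c - 1) (h1 : c - 1 < (donuts.length : Int))
    (_hcnt : 0 ≤ cnt) (hP : ∀ p ∈ P, 0 ≤ p.2)
    (hv : donuts.getD (PySem.Int.mod (c - 1) donuts.length).toNat 0 ≤ 0) :
    sumSadP donuts ((c, cnt) :: P) = cnt + sumSadP donuts P := by
  have hn : 0 < (donuts.length : Int) := by omega
  set i0 : Nat := (PySem.Int.mod (c - 1) donuts.length).toNat with hi0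
  have hi0lt : i0 < donuts.length := by
    have := PySem.Int.mod_nonneg (c - 1) hn
    have := PySem.Int.mod_lt (c - 1) hn
    omega
  have hmodi0 : PySem.Int.mod (c - 1) (donuts.length : Int) = (i0 : Int) := by
    have := PySem.Int.mod_nonneg (c - 1) hn
    omega
  unfold sumSadP
  have hsplit :
      (List.range donuts.length).map
        (fun (k : Nat) => gSad (needP (donuts.length : Int) ((c, cnt) :: P) ((k : Nat) : Int))
          (donuts.getD k 0)) =
      (List.range donuts.length).map
        (fun (k : Nat) =>
          (if decide (i0 = k) = true then cnt else 0) +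
            gSad (needP (donuts.length : Int) P ((k : Nat) : Int)) (donuts.getD k 0)) := by
    apply List.map_congr_left
    intro k hk
    have hklt : k < donuts.length := List.mem_range.mp hk
    rw [needP_cons, hmodi0]
    by_cases hki : i0 = k
    · subst hki
      have hneed := needP_nonneg (donuts.length : Int) P ((i0 : Nat) : Int) hP
      rw [List.getD_eq_getElem _ 0 hklt] at hv
      rw [List.getD_eq_getElem _ 0 hklt]
      rw [if_pos rfl, if_pos (decide_eq_true rfl)]
      unfold gSad
      omega
    · have hne : ¬ ((i0 : Int) = (k : Int)) := by exact_mod_cast hki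
      rw [if_neg hne, if_neg (by simpa using hki), zero_add, zero_add]
  rw [hsplit, PySem.List.sum_map_add_int]
  have hcst :
      ((List.range donuts.length).map
        (fun (k : Nat) => if decide (i0 = k) = true then cnt else 0)).sum = cnt := by
    have hcount : (List.range donuts.length).countP (fun k => decide (i0 = k)) = 1 := by
      have h1 : (List.range donuts.length).countP (fun k => decide (i0 = k)) =
          (List.range donuts.length).count i0 := by
        apply List.countP_congr
        intro k _
        by_cases h : i0 = k
        · subst h; simp
        · simp [h, Ne.symm h]
      rw [h1, List.count_range, if_pos hi0lt]
    calc ((List.range donuts.length).map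
        (fun (k : Nat) => if decide (i0 = k) = true then cnt else 0)).sum
        = ((List.range donuts.length).map
            (fun (k : Nat) => cnt * (if decide (i0 = k) = true then 1 else 0))).sum := by
          apply congrArg; apply List.map_congr_left; intro k _; split_ifs <;> ring
      _ = cnt * ((List.range donuts.length).map
            (fun (k : Nat) => if decide (i0 = k) = true then (1:Int) else 0)).sum := by
          rw [← List.sum_map_mul_left]
      _ = cnt := by rw [PySem.List.sum_map_ite_one_zero, hcount]; ring
  rw [hcst]

-- main loop invariant for A's serve loop, against the per-cell sum over unit pairs
theorem sdServe_eq (cs : List Int) : ∀ (donuts : List Int) (sad : Int),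
    (∀ c ∈ cs, PySem.Raise.InRange donuts.length (c - 1)) →
    sdServe donuts sad cs = sad + sumSadP donuts (cs.map (fun c => (c, 1))) := by
  induction cs with
  | nil => intro donuts sad _; simp [sdServe, sumSadP_nil]
  | cons c rest ih =>
    intro donuts sad hpre
    obtain ⟨h0, h1⟩ := hpre c (by simp)
    have hget := pyGet?_inrange donuts h0 h1
    have hrest : ∀ p ∈ rest.map (fun c => (c, (1:Int))), 0 ≤ p.2 := by
      intro p hp
      simp only [List.mem_map] at hp
      obtain ⟨x, -, rfl⟩ := hp
      norm_num
    simp only [sdServe, hget, List.map_cons]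
    split_ifs with hv
    · have hmin : min (1:Int) (donuts.getD (PySem.Int.mod (c - 1) donuts.length).toNat 0) = 1 := by
        omega
      have hset := pySetD_inrange donuts
        (donuts.getD (PySem.Int.mod (c - 1) donuts.length).toNat 0 - 1) h0 h1
      rw [hset, ih _ sad (by
        intro c' hc'
        have := hpre c' (List.mem_cons_of_mem _ hc')
        simpa [List.length_set] using this)]
      rw [sumSadP_cons_pos donuts c 1 _ h0 h1 (by norm_num) hrest hv, hmin]
      omega
    · rw [ih _ (sad + 1) (fun c' hc' => hpre c' (List.mem_cons_of_mem _ hc')),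
        sumSadP_cons_nonpos donuts c 1 _ h0 h1 (by norm_num) hrest (by omega)]
      omega

-- main loop invariant for B's settle loop over the demand pairs
theorem sdFold_eq (P : List (Int × Int)) : ∀ (donuts : List Int) (sad : Int),
    (∀ p ∈ P, PySem.Raise.InRange donuts.length (p.1 - 1)) →
    (∀ p ∈ P, 0 ≤ p.2) →
    (P.foldl sdStep (donuts, sad)).2 = sad + sumSadP donuts P := by
  induction P with
  | nil => intro donuts sad _ _; simp [sumSadP_nil]
  | cons q rest ih =>
    intro donuts sad hpre hnn
    obtain ⟨c, cnt⟩ := q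
    obtain ⟨h0, h1⟩ := hpre (c, cnt) (by simp)
    have hget := pyGet?_inrange donuts h0 h1
    have hrest : ∀ p ∈ rest, 0 ≤ p.2 := fun p hp => hnn p (List.mem_cons_of_mem _ hp)
    simp only [List.foldl_cons, sdStep, hget]
    split_ifs with hv
    · have hset := pySetD_inrange donuts
        (donuts.getD (PySem.Int.mod (c - 1) donuts.length).toNat 0 -
          min cnt (donuts.getD (PySem.Int.mod (c - 1) donuts.length).toNat 0)) h0 h1
      rw [hset, ih _ _ (by
        intro p hp
        have := hpre p (List.mem_cons_of_mem _ hp)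
        simpa [List.length_set] using this) hrest]
      rw [sumSadP_cons_pos donuts c cnt rest h0 h1 (hnn (c, cnt) (by simp)) hrest hv]
      ring
    · rw [ih _ _ (fun p hp => hpre p (List.mem_cons_of_mem _ hp)) hrest,
        sumSadP_cons_nonpos donuts c cnt rest h0 h1 (hnn (c, cnt) (by simp)) hrest (by omega)]
      ring

-- an indicator sum over a duplicate-free list containing c picks out c's term
theorem sum_indicator_single (q : Int → Prop) [DecidablePred q] (c : Int) :
    ∀ (ks : List Int), ks.Nodup → c ∈ ks →
    (ks.map (fun x => if q x ∧ c = x then (1:Int) else 0)).sum = if q c then 1 else 0 := by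
  intro ks
  induction ks with
  | nil => intro _ hc; cases hc
  | cons a ks ih =>
    intro hnd hc
    simp only [List.map_cons, List.sum_cons]
    by_cases hac : c = a
    · subst hac
      have hzero : (ks.map (fun x => if q x ∧ c = x then (1:Int) else 0)).sum = 0 := by
        apply List.sum_eq_zero
        intro y hy
        simp only [List.mem_map] at hy
        obtain ⟨k', hk', rfl⟩ := hy
        have hne : ¬ c = k' := by
          intro h; subst h; exact (List.nodup_cons.mp hnd).1 hk'
        simp [hne]
      rw [hzero, add_zero]
      by_cases hq : q c
      · simp [hq]
      · simp [hq]
    · have hno : ¬ (q a ∧ c = a) := fun h => hac h.2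
      rw [if_neg hno, zero_add]
      exact ih (List.nodup_cons.mp hnd).2 ((List.mem_cons.mp hc).resolve_left hac)

-- grouping: a sum of counts over distinct keys covering cs equals the element-wise sum
theorem sum_dedup_count (cs : List Int) (q : Int → Prop) [DecidablePred q] :
    ∀ (ks : List Int), ks.Nodup → (∀ x ∈ cs, x ∈ ks) →
    (ks.map (fun k => if q k then (cs.count k : Int) else 0)).sum =
      (cs.map (fun c => if q c then (1:Int) else 0)).sum := by
  induction cs with
  | nil =>
    intro ks _ _
    simp only [List.map_nil, List.sum_nil]
    apply List.sum_eq_zero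
    intro x hx
    simp only [List.mem_map] at hx
    obtain ⟨k, -, rfl⟩ := hx
    simp
  | cons c rest ih =>
    intro ks hnd hmem
    have hstep : (ks.map (fun k => if q k then ((c :: rest).count k : Int) else 0)).sum =
        (ks.map (fun k => (if q k then (rest.count k : Int) else 0) +
          (if q k ∧ c = k then (1:Int) else 0))).sum := by
      apply congrArg; apply List.map_congr_left
      intro k _
      rw [List.count_cons]
      by_cases h1 : q k <;> by_cases h2 : c = k <;> simp [h1, h2]
    rw [hstep, PySem.List.sum_map_add_int,
      sum_indicator_single q c ks hnd (hmem c (by simp)),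
      ih ks hnd (fun x hx => hmem x (List.mem_cons_of_mem _ hx)),
      List.map_cons, List.sum_cons]
    ring

-- the tallied pairs place the same per-cell demand as the raw customer list
theorem needP_counter (cs : List Int) (n i : Int) :
    needP n ((PySem.Set.ofList cs).map (fun k => (k, (cs.count k : Int)))) i =
      needP n (cs.map (fun c => (c, 1))) i := by
  unfold needP
  rw [List.map_map, List.map_map]
  exact sum_dedup_count cs (fun k => PySem.Int.mod (k - 1) n = i) (PySem.Set.ofList cs)
    (PySem.Set.nodup_ofList cs) (fun x hx => (PySem.Set.mem_ofList cs x).mpr hx)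

theorem sumSadP_congr (donuts : List Int) (P Q : List (Int × Int))
    (h : ∀ i, needP (donuts.length : Int) P i = needP (donuts.length : Int) Q i) :
    sumSadP donuts P = sumSadP donuts Q := by
  unfold sumSadP
  apply congrArg; apply List.map_congr_left
  intro k _
  rw [h ((k : Nat) : Int)]

-- ===== VERDICT (by name: the statement is the Claim_ definition above) =====
theorem selling_donuts_solution_spec : Claim_equal_selling_donuts_solution := by
  intro donuts customers _ hpre
  unfold Spec_selling_donuts_solution selling_donuts_solution selling_donuts_solution_alt
  have hcnt : sdCount customers = PySem.Dict.counter customers :=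
    PySem.Dict.foldl_insert_getD_add_one_eq_counter customers
  rw [hcnt, PySem.Dict.items_counter]
  rw [sdFold_eq _ donuts 0
    (by
      intro p hp
      simp only [List.mem_map] at hp
      obtain ⟨k, hk, rfl⟩ := hp
      exact hpre k ((PySem.Set.mem_ofList customers k).mp hk))
    (by
      intro p hp
      simp only [List.mem_map] at hp
      obtain ⟨k, -, rfl⟩ := hp
      simp)]
  rw [sdServe_eq customers donuts 0 hpre]
  rw [sumSadP_congr donuts _ _ (needP_counter customers (donuts.length : Int))]
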